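-- pv_equiv track=rewrite | github.com/almacro/snippets | python/projects/decoder.py | pyramid
-- ===== SOURCE A (Python) =====
-- def pyramid(n):
--     pyr = []
--     c = 1
--     for i in range(1,n+1):
--         l = []
--         for j in range(i):
--             l.append(c)
--             c = c + 1
--
--         pyr.append(l)
--
--     return pyr
-- ===== SOURCE B (Python) =====
-- def pyramid(n):
--     result = []
--     for i in range(1, n + 1):
--         start = i * (i - 1) // 2 + 1
--         result.append(list(range(start, start + i)))
--     return result
-- ===== Notes on version B (the rewrite author's own statement) =====
-- stated objective: simpler
-- what changed: Each row is computed independently from its row index via the triangular-number closed form for its starting value and a single range call, eliminating the cross-row running counter and the inner element-by-element accumulation loop.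
import Mathlib
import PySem

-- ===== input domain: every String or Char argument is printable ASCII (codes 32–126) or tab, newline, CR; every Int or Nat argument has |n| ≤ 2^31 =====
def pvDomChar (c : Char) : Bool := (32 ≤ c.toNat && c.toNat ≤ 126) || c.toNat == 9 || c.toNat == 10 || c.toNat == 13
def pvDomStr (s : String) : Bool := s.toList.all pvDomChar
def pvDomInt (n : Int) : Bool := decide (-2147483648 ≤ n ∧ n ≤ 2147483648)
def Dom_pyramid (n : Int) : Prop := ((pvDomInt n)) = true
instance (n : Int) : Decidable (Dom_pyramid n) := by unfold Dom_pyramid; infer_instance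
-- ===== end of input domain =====

-- B computes each row independently from its index via the closed form start = i*(i-1)//2 + 1,
-- removing A's cross-row running counter and inner accumulation loop (simpler decomposition).


-- ===== PORT A =====
-- literal port: outer loop over range(1, n+1) threading (pyr, c); inner loop appends c and increments it
def pyramid (n : Int) : List (List Int) :=
  (((PySem.List.pyRange 1 (n + 1) 1).foldl
      (fun (st : List (List Int) × Int) i =>
        let inner := (PySem.List.pyRange 0 i 1).foldl
          (fun (st2 : List Int × Int) _j => (st2.1 ++ [st2.2], st2.2 + 1)) ([], st.2)
        (st.1 ++ [inner.1], inner.2))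
      ([], 1))).1

-- ===== PORT B =====
def pyramid_alt (n : Int) : List (List Int) :=
  (PySem.List.pyRange 1 (n + 1) 1).map (fun i =>
    let start := PySem.Int.floordiv (i * (i - 1)) 2 + 1
    PySem.List.pyRange start (start + i) 1)

-- ===== PRECONDITION & SPEC =====
def Spec_pyramid (n : Int) (out : List (List Int)) : Prop := out = pyramid_alt n
instance (n : Int) (out : List (List Int)) : Decidable (Spec_pyramid n out) := by unfold Spec_pyramid; infer_instance

-- ===== CLAIM (what is proved, stated in full; the proofs are below) =====
def Claim_equal_pyramid : Prop := ∀ (n : Int), Dom_pyramid n → Spec_pyramid n (pyramid n)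

-- ===== LEMMAS AND PROOFS =====

-- closed-form start of row i
def pvStart (i : Int) : Int := PySem.Int.floordiv (i * (i - 1)) 2 + 1

lemma pvStart_succ (i : Int) : pvStart (i + 1) = pvStart i + i := by
  unfold pvStart
  rw [PySem.Int.floordiv_eq_ediv_of_pos (a := i * (i - 1)) (by omega),
      PySem.Int.floordiv_eq_ediv_of_pos (a := (i + 1) * (i + 1 - 1)) (by omega)]
  have h : (i + 1) * (i + 1 - 1) = i * (i - 1) + i * 2 := by ring
  rw [h, Int.add_mul_ediv_right _ _ (by norm_num : (2:Int) ≠ 0)]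
  ring

-- the inner loop starting at counter c over a list of length L produces range(c, c+L) and counter c+L
lemma inner_loop (xs : List Int) (l0 : List Int) (c : Int) :
    xs.foldl (fun (st2 : List Int × Int) _j => (st2.1 ++ [st2.2], st2.2 + 1)) (l0, c)
      = (l0 ++ PySem.List.pyRange c (c + xs.length) 1, c + xs.length) := by
  induction xs generalizing l0 c with
  | nil => simp
  | cons x t ih =>
    simp only [List.foldl_cons, ih, List.length_cons]
    have hc : c + ((t.length + 1 : Nat) : Int) = (c + 1) + (t.length : Int) := by push_cast; ring
    rw [hc, PySem.List.pyRange_one_cons (by have := Int.natCast_nonneg t.length; omega : c < c + 1 + (t.length : Int))]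
    simp [List.append_assoc]

-- outer loop invariant: after rows 1..m the accumulator is the mapped rows and the counter is pvStart (m+1)
lemma outer_loop (m : Nat) :
    (PySem.List.pyRange 1 ((m : Int) + 1) 1).foldl
      (fun (st : List (List Int) × Int) i =>
        let inner := (PySem.List.pyRange 0 i 1).foldl
          (fun (st2 : List Int × Int) _j => (st2.1 ++ [st2.2], st2.2 + 1)) ([], st.2)
        (st.1 ++ [inner.1], inner.2))
      ([], 1)
    = ((PySem.List.pyRange 1 ((m : Int) + 1) 1).map (fun i =>
         PySem.List.pyRange (pvStart i) (pvStart i + i) 1), pvStart ((m : Int) + 1)) := by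
  induction m with
  | zero =>
    simp [PySem.List.pyRange_one_eq_nil (by omega : (1:Int) ≤ 1), pvStart,
      PySem.Int.floordiv]
  | succ k ih =>
    have hsplit : PySem.List.pyRange 1 (((k : Int) + 1) + 1) 1
        = PySem.List.pyRange 1 ((k : Int) + 1) 1 ++ [(k : Int) + 1] :=
      PySem.List.pyRange_one_succ_right (by omega)
    push_cast
    rw [hsplit, List.foldl_append, ih, List.map_append]
    simp only [List.foldl_cons, List.foldl_nil, List.map_cons, List.map_nil]
    have hinner := inner_loop (PySem.List.pyRange 0 ((k : Int) + 1) 1) [] (pvStart ((k : Int) + 1))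
    rw [PySem.List.length_pyRange_one] at hinner
    have hlen : (((((k : Int) + 1) - 0).toNat : Int)) = (k : Int) + 1 := by omega
    rw [hlen] at hinner
    rw [hinner]
    simp only [List.nil_append, Prod.mk.injEq]
    rw [pvStart_succ ((k : Int) + 1)]
    exact ⟨trivial, rfl⟩

theorem pyramid_spec_aux (n : Int) : pyramid n = pyramid_alt n := by
  unfold pyramid pyramid_alt
  by_cases h : n ≤ 0
  · rw [PySem.List.pyRange_one_eq_nil (by omega : n + 1 ≤ 1)]; rfl
  · obtain ⟨m, rfl⟩ : ∃ m : Nat, n = (m : Int) := ⟨n.toNat, by omega⟩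
    have h2 := congrArg Prod.fst (outer_loop m)
    simp only at h2
    rw [h2]
    simp only [pvStart]

-- ===== VERDICT (by name: the statement is the Claim_ definition above) =====
theorem pyramid_spec : Claim_equal_pyramid := by
  intro n _
  exact pyramid_spec_aux n
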